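-- pv_equiv track=rewrite | github.com/Run0812/Algorithm-Learning | to_offer/53_03_IntegerIdenticalToIndex.py | integer_identical_to_index
-- ===== SOURCE A (Python) =====
-- def integer_identical_to_index(nums):
--     """
--     :param nums: array
--     :return: the number equals its index
--     """
--     left, right = 0, len(nums) - 1
--     while left <= right:
--         mid = (left + right) >> 1
--         if nums[mid] < mid:
--             left = mid + 1
--         elif nums[mid] > mid:
--             right = mid - 1
--         else:
--             break
--     else:
--         raise Exception('NO SUCH NUMBER')
--     return mid
-- ===== SOURCE B (Python) =====
-- def integer_identical_to_index(nums):
--     """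
--     :param nums: array
--     :return: the number equals its index
--     """
--     def search(base, size):
--         if size <= 0:
--             raise Exception('NO SUCH NUMBER')
--         half = (size - 1) >> 1
--         mid = base + half
--         if nums[mid] < mid:
--             return search(mid + 1, size - half - 1)
--         if nums[mid] > mid:
--             return search(base, half)
--         return mid
--     return search(0, len(nums))
-- ===== Notes on version B (the rewrite author's own statement) =====
-- stated objective: alternative
-- what changed: Recasts the iterative two-pointer (left,right) binary search as a recursive helper over a (base,size) window with half=(size-1)>>1, a different state and control decomposition that provably probes the same midpoints, so the returned index and the raise behaviour match on every input.
import Mathlib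
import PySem

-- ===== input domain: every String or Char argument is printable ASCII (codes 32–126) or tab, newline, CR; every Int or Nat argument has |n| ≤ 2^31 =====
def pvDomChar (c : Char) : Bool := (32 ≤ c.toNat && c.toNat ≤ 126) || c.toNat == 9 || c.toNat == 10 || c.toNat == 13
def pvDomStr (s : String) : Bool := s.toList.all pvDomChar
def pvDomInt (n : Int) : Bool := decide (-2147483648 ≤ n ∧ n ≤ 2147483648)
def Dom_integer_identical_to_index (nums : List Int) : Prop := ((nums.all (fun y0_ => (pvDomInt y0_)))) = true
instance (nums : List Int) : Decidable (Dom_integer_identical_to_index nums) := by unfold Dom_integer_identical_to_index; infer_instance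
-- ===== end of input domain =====

-- B recasts A's iterative (left,right)-pointer binary search as a recursive search over a
-- (base,size) window with the same probe sequence; proved equal on every input Pre_ admits.



-- ===== PORT A =====
-- while left <= right: mid = (left+right) >> 1 ('>> 1' = floor division by 2, exact for all
-- ints); the 'else: raise' path is the sentinel -1 and an IndexError the sentinel -2 (both
-- exception paths lie outside Pre_, and both ports take them on exactly the same inputs).
def pvLoopA (nums : List Int) (left right : Int) : Int :=
  if h : left ≤ right then
    let mid := PySem.Int.floordiv (left + right) 2
    match PySem.List.pyGet? nums mid with
    | none => -2  -- IndexError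
    | some v =>
      if v < mid then pvLoopA nums (mid + 1) right
      else if v > mid then pvLoopA nums left (mid - 1)
      else mid
  else -1  -- raise Exception('NO SUCH NUMBER')
termination_by (right + 1 - left).toNat
decreasing_by
  · have := PySem.Int.floordiv_two_mid_bounds h; omega
  · have := PySem.Int.floordiv_two_mid_bounds h; omega

def integer_identical_to_index (nums : List Int) : Int :=
  pvLoopA nums 0 ((nums.length : Int) - 1)

-- ===== PORT B =====
-- def search(base, size): if size <= 0: raise …; half = (size-1) >> 1; mid = base + half; …
-- same sentinels as port A's exception paths (-1 for the raise, -2 for IndexError).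
def pvSearchB (nums : List Int) (base size : Int) : Int :=
  if hs : size ≤ 0 then -1  -- raise Exception('NO SUCH NUMBER')
  else
    let half := PySem.Int.floordiv (size - 1) 2
    let mid := base + half
    match PySem.List.pyGet? nums mid with
    | none => -2  -- IndexError
    | some v =>
      if v < mid then pvSearchB nums (mid + 1) (size - half - 1)
      else if v > mid then pvSearchB nums base half
      else mid
termination_by size.toNat
decreasing_by
  · have := (PySem.Int.floordiv_eq_iff_of_pos (by omega : (0:Int) < 2)).mp
      (rfl : PySem.Int.floordiv (size - 1) 2 = PySem.Int.floordiv (size - 1) 2)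
    omega
  · have := (PySem.Int.floordiv_eq_iff_of_pos (by omega : (0:Int) < 2)).mp
      (rfl : PySem.Int.floordiv (size - 1) 2 = PySem.Int.floordiv (size - 1) 2)
    omega

def integer_identical_to_index_alt (nums : List Int) : Int :=
  pvSearchB nums 0 (nums.length : Int)

-- ===== PRECONDITION & SPEC =====
-- pvOnPath nums k l r i: the fixed point nums[i] = i lies on the bisection's probe path
-- through the window [l, r] — every probe m before reaching i steers toward i (nums[m] < m when
-- m is left of i, nums[m] > m when m is right of i), and at i itself nums[i] = i holds.  The
-- depth bound k only makes the recursion structural: each step shrinks the window, so the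
-- initial bound nums.length never runs out.
def pvOnPath (nums : List Int) : Nat → Int → Int → Int → Bool
  | 0, _, _, _ => false
  | k + 1, l, r, i =>
    if l ≤ r then
      let m := PySem.Int.floordiv (l + r) 2
      let v := nums.getD m.toNat 0
      if m = i then v == i
      else if m < i then decide (v < m) && pvOnPath nums k (m + 1) r i
      else decide (v > m) && pvOnPath nums k l (m - 1) i
    else false

-- Pre_ excludes exactly the inputs on which A raises Exception('NO SUCH NUMBER') (B raises the
-- same exception on exactly the same inputs): it holds iff some fixed point nums[i] = i lies on
-- the bisection's dyadic probe path; no input on which A returns a value is excluded.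
def Pre_integer_identical_to_index (nums : List Int) : Prop :=
  ∃ i < nums.length, pvOnPath nums nums.length 0 ((nums.length : Int) - 1) (i : Int) = true
instance (nums : List Int) : Decidable (Pre_integer_identical_to_index nums) := by
  unfold Pre_integer_identical_to_index; infer_instance

def pvWitness_integer_identical_to_index : List Int := [-1, 1, 3]

def Spec_integer_identical_to_index (nums : List Int) (out : Int) : Prop := out = integer_identical_to_index_alt nums
instance (nums : List Int) (out : Int) : Decidable (Spec_integer_identical_to_index nums out) := by unfold Spec_integer_identical_to_index; infer_instance

-- ===== CLAIM (what is proved, stated in full; the proofs are below) =====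
def Claim_equal_integer_identical_to_index : Prop := ∀ (nums : List Int), Dom_integer_identical_to_index nums → Pre_integer_identical_to_index nums → Spec_integer_identical_to_index nums (integer_identical_to_index nums)

-- ===== LEMMAS AND PROOFS =====

-- the two searches maintain corresponding windows: left = base, right = base + size - 1
lemma pvLoopA_eq_pvSearchB (nums : List Int) :
    ∀ (n : Nat) (b s : Int), s.toNat ≤ n →
      pvLoopA nums b (b + s - 1) = pvSearchB nums b s := by
  intro n
  induction n with
  | zero =>
    intro b s hn
    have hs : s ≤ 0 := by omega
    rw [pvLoopA, pvSearchB, dif_neg (by omega : ¬ b ≤ b + s - 1), dif_pos hs]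
  | succ n ih =>
    intro b s hn
    by_cases hs : s ≤ 0
    · rw [pvLoopA, pvSearchB, dif_neg (by omega : ¬ b ≤ b + s - 1), dif_pos hs]
    · rw [pvLoopA, pvSearchB, dif_pos (by omega : b ≤ b + s - 1), dif_neg hs]
      have hhalf := (PySem.Int.floordiv_eq_iff_of_pos (by omega : (0:Int) < 2)).mp
        (rfl : PySem.Int.floordiv (s - 1) 2 = PySem.Int.floordiv (s - 1) 2)
      set half := PySem.Int.floordiv (s - 1) 2 with hhdef
      have hmid : PySem.Int.floordiv (b + (b + s - 1)) 2 = b + half := by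
        rw [PySem.Int.floordiv_eq_iff_of_pos (by omega : (0:Int) < 2)]
        constructor <;> omega
      simp only [hmid]
      cases hget : PySem.List.pyGet? nums (b + half) with
      | none => rfl
      | some v =>
        dsimp only
        by_cases h1 : v < b + half
        · rw [if_pos h1, if_pos h1]
          have harg : b + s - 1 = (b + half + 1) + (s - half - 1) - 1 := by omega
          rw [harg]
          exact ih (b + half + 1) (s - half - 1) (by omega)
        · rw [if_neg h1, if_neg h1]
          by_cases h2 : b + half < v
          · rw [if_pos h2, if_pos h2]
            exact ih b half (by omega)
          · rw [if_neg h2, if_neg h2]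

-- ===== VERDICT (by name: the statement is the Claim_ definition above) =====
theorem integer_identical_to_index_spec : Claim_equal_integer_identical_to_index := by
  intro nums _ _
  unfold Spec_integer_identical_to_index integer_identical_to_index integer_identical_to_index_alt
  have h : (0 : Int) + (nums.length : Int) - 1 = (nums.length : Int) - 1 := by omega
  rw [← h]
  exact pvLoopA_eq_pvSearchB nums (nums.length) 0 (nums.length : Int) (by omega)
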